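-- pv_equiv track=rewrite | github.com/vartulChanana/daily-potd | GFG/2025-07-13.py | nonLisMaxSum
-- ===== SOURCE A (Python) =====
-- def nonLisMaxSum(arr):
--     n = len(arr)
--     dp = [1] * n
--     sum_dp = [arr[i] for i in range(n)]  # Sum of LIS ending at i
--
--     for i in range(n):
--         for j in range(i):
--             if arr[j] < arr[i]:
--                 if dp[j] + 1 > dp[i]:
--                     dp[i] = dp[j] + 1
--                     sum_dp[i] = sum_dp[j] + arr[i]
--                 elif dp[j] + 1 == dp[i]:
--                     sum_dp[i] = min(sum_dp[i], sum_dp[j] + arr[i])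
--
--     max_lis_len = max(dp)
--     min_lis_sum = float('inf')
--
--     for i in range(n):
--         if dp[i] == max_lis_len:
--             min_lis_sum = min(min_lis_sum, sum_dp[i])
--
--     total_sum = sum(arr)
--     return total_sum - min_lis_sum
-- ===== SOURCE B (Python) =====
-- # B: coordinate-compressed functional segment tree storing (LIS length, min sum);
-- # prefix query over ranks replaces A's inner O(n) scan -> O(n log n).
-- def _comb(a, b):
--     if a[0] > b[0]:
--         return a
--     if b[0] > a[0]:
--         return b
--     return (a[0], min(a[1], b[1]))
--
-- def _make(h):
--     if h == 0:
--         return ('L', (0, 0))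
--     t = _make(h - 1)
--     return ('N', (0, 0), t, t)
--
-- def _update(t, h, pos, item):
--     if h == 0:
--         return ('L', _comb(t[1], item))
--     half = 1 << (h - 1)
--     if pos < half:
--         return ('N', _comb(t[1], item), _update(t[2], h - 1, pos, item), t[3])
--     return ('N', _comb(t[1], item), t[2], _update(t[3], h - 1, pos - half, item))
--
-- def _query(t, h, k):
--     # combine of leaves [0, k) of a subtree of height h
--     if k <= 0:
--         return (0, 0)
--     if k >= (1 << h):
--         return t[1]
--     half = 1 << (h - 1)
--     if k <= half:
--         return _query(t[2], h - 1, k)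
--     return _comb(t[2][1], _query(t[3], h - 1, k - half))
--
-- def nonLisMaxSum(arr):
--     vals = sorted(set(arr))
--     rank = {v: i for i, v in enumerate(vals)}
--     h = 0
--     while (1 << h) < len(vals):
--         h += 1
--     tree = _make(h)
--     best = (0, 0)
--     for v in arr:
--         q = _query(tree, h, rank[v])
--         cand = (q[0] + 1, q[1] + v)
--         best = _comb(best, cand)
--         tree = _update(tree, h, rank[v], cand)
--     return sum(arr) - best[1]
-- ===== Notes on version B (the rewrite author's own statement) =====
-- stated objective: faster
-- what changed: Replaced A's O(n^2) nested DP scan with a coordinate-compressed functional segment tree storing (LIS length, min sum) pairs, answering each 'best over smaller values' query as a prefix query in O(log n).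
import Mathlib
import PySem

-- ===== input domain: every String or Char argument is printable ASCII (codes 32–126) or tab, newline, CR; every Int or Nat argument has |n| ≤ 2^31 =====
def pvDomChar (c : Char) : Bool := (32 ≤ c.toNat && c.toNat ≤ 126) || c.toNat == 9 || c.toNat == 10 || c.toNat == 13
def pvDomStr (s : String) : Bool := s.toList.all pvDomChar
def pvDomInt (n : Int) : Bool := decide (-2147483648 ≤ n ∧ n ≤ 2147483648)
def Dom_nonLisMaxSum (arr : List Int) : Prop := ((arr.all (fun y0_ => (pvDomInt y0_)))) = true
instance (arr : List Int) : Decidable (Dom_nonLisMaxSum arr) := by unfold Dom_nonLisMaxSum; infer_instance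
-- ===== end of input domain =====

-- B replaces A's quadratic inner scan by a coordinate-compressed functional segment
-- tree storing (LIS length, min sum) pairs; objective: faster (O(n^2) → O(n log n)).

-- ===== PORT A =====
-- literal transliteration of A's nested DP loops; float('inf') is ported as Option
-- (none = inf), exact here because a finite minimum always exists on Pre_ (arr ≠ []).
def nonLisMaxSum (arr : List Int) : Int :=
  let n : Int := arr.length
  let dp0 : List Int := List.replicate arr.length (1 : Int)
  let sd0 : List Int := (PySem.List.pyRange 0 n 1).map (fun i => PySem.List.pyGetD arr i 0)
  let st := (PySem.List.pyRange 0 n 1).foldl (fun st i =>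
      (PySem.List.pyRange 0 i 1).foldl (fun st j =>
        if PySem.List.pyGetD arr j 0 < PySem.List.pyGetD arr i 0 then
          if PySem.List.pyGetD st.1 j 0 + 1 > PySem.List.pyGetD st.1 i 0 then
            (PySem.List.pySetD st.1 i (PySem.List.pyGetD st.1 j 0 + 1),
             PySem.List.pySetD st.2 i (PySem.List.pyGetD st.2 j 0 + PySem.List.pyGetD arr i 0))
          else if PySem.List.pyGetD st.1 j 0 + 1 = PySem.List.pyGetD st.1 i 0 then
            (st.1,
             PySem.List.pySetD st.2 i
               (min (PySem.List.pyGetD st.2 i 0)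
                    (PySem.List.pyGetD st.2 j 0 + PySem.List.pyGetD arr i 0)))
          else st
        else st) st) (dp0, sd0)
  let maxLen : Int := (PySem.List.max? st.1 (fun x => x)).getD 0  -- max(dp); [] excluded by Pre_
  let minSum : Option Int := (PySem.List.pyRange 0 n 1).foldl (fun acc i =>
      if PySem.List.pyGetD st.1 i 0 = maxLen then
        some (match acc with
              | none => PySem.List.pyGetD st.2 i 0
              | some m => min m (PySem.List.pyGetD st.2 i 0))
      else acc) none
  arr.sum - minSum.getD 0

-- ===== PORT B =====
-- transliteration of Source B: _comb / _make / _update / _query and the driver loop.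
def comb (a b : Int × Int) : Int × Int :=
  if a.1 > b.1 then a else if b.1 > a.1 then b else (a.1, min a.2 b.2)

inductive SegTree where
  | leaf : Int × Int → SegTree
  | node : Int × Int → SegTree → SegTree → SegTree
deriving DecidableEq, Repr

def stAgg : SegTree → Int × Int
  | .leaf v => v
  | .node v _ _ => v

def stMake : Nat → SegTree
  | 0 => .leaf (0, 0)
  | h + 1 => let t := stMake h; .node (0, 0) t t

def stUpdate : SegTree → Nat → Nat → (Int × Int) → SegTree
  | t, 0, _, item => .leaf (comb (stAgg t) item)
  | t, h + 1, pos, item =>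
    match t with
    | .leaf v => .leaf v  -- unreachable on well-formed input (a height-(h+1) tree is a node)
    | .node agg l r =>
      if pos < 2 ^ h then .node (comb agg item) (stUpdate l h pos item) r
      else .node (comb agg item) l (stUpdate r h (pos - 2 ^ h) item)

def stQuery : SegTree → Nat → Nat → Int × Int
  | t, h, k =>
    if k = 0 then (0, 0)
    else if 2 ^ h ≤ k then stAgg t
    else
      match h, t with
      | h' + 1, .node _ l r =>
        if k ≤ 2 ^ h' then stQuery l h' k
        else comb (stAgg l) (stQuery r h' (k - 2 ^ h'))
      | _, t => stAgg t  -- unreachable: h = 0 forces k ≥ 2^0 above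

-- Source B's 'while (1 << h) < len(vals): h += 1'
def findH (m h : Nat) : Nat :=
  if 2 ^ h < m then findH m (h + 1) else h
termination_by m - 2 ^ h
decreasing_by
  have h2 : 2 ^ h < 2 ^ (h + 1) := Nat.pow_lt_pow_right (by norm_num) (Nat.lt_succ_self h)
  omega

-- Source B's 'rank = {v: i for i, v in enumerate(vals)}; rank[v]' = first index of v in
-- the duplicate-free list vals, i.e. List.idxOf.
def nonLisMaxSum_alt (arr : List Int) : Int :=
  let vals : List Int := PySem.List.sorted (PySem.Set.ofList arr) (fun x => x) false
  let h : Nat := findH vals.length 0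
  let st := arr.foldl (fun (st : SegTree × (Int × Int)) v =>
      let pos := vals.idxOf v
      let q := stQuery st.1 h pos
      let cand := (q.1 + 1, q.2 + v)
      (stUpdate st.1 h pos cand, comb st.2 cand)) (stMake h, (0, 0))
  arr.sum - st.2.2

-- ===== PRECONDITION & SPEC =====
-- Pre_ excludes only the empty list, on which A raises ValueError (max of an empty sequence).
def Pre_nonLisMaxSum (arr : List Int) : Prop := arr ≠ []
instance (arr : List Int) : Decidable (Pre_nonLisMaxSum arr) := by unfold Pre_nonLisMaxSum; infer_instance
def pvWitness_nonLisMaxSum : List Int := [3, 1, 2]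

def Spec_nonLisMaxSum (arr : List Int) (out : Int) : Prop := out = nonLisMaxSum_alt arr
instance (arr : List Int) (out : Int) : Decidable (Spec_nonLisMaxSum arr out) := by unfold Spec_nonLisMaxSum; infer_instance

-- ===== CLAIM (what is proved, stated in full; the proofs are below) =====
def Claim_equal_nonLisMaxSum : Prop := ∀ (arr : List Int), Dom_nonLisMaxSum arr → Pre_nonLisMaxSum arr → Spec_nonLisMaxSum arr (nonLisMaxSum arr)

-- ===== LEMMAS AND PROOFS =====
def goodP (p : Int × Int) : Prop := p = (0,0) ∨ 1 ≤ p.1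
def foldC (l : List (Int × Int)) : Int × Int := l.foldl comb (0, 0)

theorem comb_fst (a b : Int × Int) : (comb a b).1 = max a.1 b.1 := by
  obtain ⟨a1,a2⟩ := a; obtain ⟨b1,b2⟩ := b; simp [comb]; split_ifs <;> simp <;> omega

theorem comb_comm (a b : Int × Int) : comb a b = comb b a := by
  obtain ⟨a1,a2⟩ := a; obtain ⟨b1,b2⟩ := b; simp [comb]; split_ifs <;> simp_all <;> omega

theorem comb_assoc (a b c : Int × Int) : comb (comb a b) c = comb a (comb b c) := by
  obtain ⟨a1,a2⟩ := a; obtain ⟨b1,b2⟩ := b; obtain ⟨c1,c2⟩ := c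
  simp [comb]; split_ifs <;> simp_all <;> omega

theorem comb_left_comm (a x y : Int × Int) : comb (comb a x) y = comb (comb a y) x := by
  rw [comb_assoc, comb_assoc, comb_comm x y]

theorem comb_zero_right {b : Int × Int} (h : goodP b) : comb b (0, 0) = b := by
  obtain ⟨b1,b2⟩ := b; rcases h with h | h
  · simp_all [comb]
  · simp only [comb]; split_ifs <;> simp_all <;> omega

theorem good_comb {a b : Int × Int} (ha : goodP a) (hb : goodP b) : goodP (comb a b) := by
  obtain ⟨a1,a2⟩ := a; obtain ⟨b1,b2⟩ := b
  simp [comb]; split_ifs <;> rcases ha with ha|ha <;> rcases hb with hb|hb <;>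
    simp_all [goodP] <;> omega

theorem foldl_comb_eq {l : List (Int × Int)} {b : Int × Int} (hb : goodP b)
    (hl : ∀ x ∈ l, goodP x) : l.foldl comb b = comb b (foldC l) := by
  induction l generalizing b with
  | nil => simp [foldC, comb_zero_right hb]
  | cons x t ih =>
    have hx : goodP x := hl x (by simp)
    have ht : ∀ y ∈ t, goodP y := fun y hy => hl y (by simp [hy])
    have hzx : comb (0, 0) x = x := by rw [comb_comm]; exact comb_zero_right hx
    simp only [List.foldl_cons, foldC]
    rw [ih (good_comb hb hx) ht, ih (by rw [hzx]; exact hx) ht, hzx, comb_assoc]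

theorem foldC_good {l : List (Int × Int)} (hl : ∀ x ∈ l, goodP x) : goodP (foldC l) := by
  induction l with
  | nil => exact Or.inl rfl
  | cons x t ih =>
    have hx : goodP x := hl x (by simp)
    have ht : ∀ y ∈ t, goodP y := fun y hy => hl y (by simp [hy])
    have hzx : comb (0, 0) x = x := by rw [comb_comm]; exact comb_zero_right hx
    show goodP (t.foldl comb (comb (0,0) x))
    rw [foldl_comb_eq (by rw [hzx]; exact hx) ht, hzx]
    exact good_comb hx (ih ht)

theorem foldC_append {l m : List (Int × Int)} (hl : ∀ x ∈ l, goodP x)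
    (hm : ∀ x ∈ m, goodP x) : foldC (l ++ m) = comb (foldC l) (foldC m) := by
  show (l ++ m).foldl comb (0,0) = _
  rw [List.foldl_append]
  exact foldl_comb_eq (foldC_good hl) hm

theorem foldl_comb_fst (l : List (Int × Int)) (b : Int × Int) :
    (l.foldl comb b).1 = l.foldl (fun m p => max m p.1) b.1 := by
  induction l generalizing b with
  | nil => rfl
  | cons x t ih => simp only [List.foldl_cons, ih, comb_fst]

theorem le_foldl_maxf {l : List (Int × Int)} (b : Int) :
    b ≤ l.foldl (fun m p => max m p.1) b ∧ ∀ p ∈ l, p.1 ≤ l.foldl (fun m p => max m p.1) b := by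
  induction l generalizing b with
  | nil => simp
  | cons x t ih =>
    refine ⟨le_trans (le_max_left _ _) (ih (max b x.1)).1, ?_⟩
    intro p hp
    rcases List.mem_cons.mp hp with h | h
    · exact le_trans (h ▸ le_max_right b x.1) (ih (max b x.1)).1
    · exact (ih (max b x.1)).2 p h

theorem le_foldC_fst {l : List (Int × Int)} {p : Int × Int} (hp : p ∈ l) :
    p.1 ≤ (foldC l).1 := by
  show p.1 ≤ (l.foldl comb (0,0)).1
  rw [foldl_comb_fst]
  exact (le_foldl_maxf 0).2 p hp

-- shift: building the candidate (q.1 + 1, q.2 + v) is a comb-homomorphism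
def shiftP (v : Int) (p : Int × Int) : Int × Int := (p.1 + 1, p.2 + v)

theorem shift_comb (v : Int) (a b : Int × Int) :
    shiftP v (comb a b) = comb (shiftP v a) (shiftP v b) := by
  obtain ⟨a1,a2⟩ := a; obtain ⟨b1,b2⟩ := b
  simp [comb, shiftP]; split_ifs <;> simp_all <;> omega

-- ===== shared specification: the DP pairs both programs compute =====
def qOf (acc : List (Int × (Int × Int))) (v : Int) : Int × Int :=
  acc.foldl (fun b w => if w.1 < v then comb b w.2 else b) (0, 0)

def stepSpec (acc : List (Int × (Int × Int))) (v : Int) : List (Int × (Int × Int)) :=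
  acc ++ [(v, shiftP v (qOf acc v))]

def items (arr : List Int) : List (Int × (Int × Int)) := arr.foldl stepSpec []

def bestOf (arr : List Int) : Int × Int := foldC ((items arr).map (·.2))

theorem items_snoc (l : List Int) (v : Int) :
    items (l ++ [v]) = items l ++ [(v, shiftP v (qOf (items l) v))] := by
  simp [items, List.foldl_append, stepSpec]

theorem map_fst_items (l : List Int) : (items l).map (·.1) = l := by
  induction l using List.reverseRecOn with
  | nil => rfl
  | append_singleton t v ih => simp [items_snoc, ih]

theorem length_items (l : List Int) : (items l).length = l.length := by
  have := congrArg List.length (map_fst_items l); simpa using this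

theorem foldl_if_comb {α : Type} (P : α → Bool) (f : α → Int × Int)
    (acc : List α) (b : Int × Int) :
    acc.foldl (fun b w => if P w then comb b (f w) else b) b
      = ((acc.filter P).map f).foldl comb b := by
  induction acc generalizing b with
  | nil => rfl
  | cons x t ih =>
    by_cases h : P x <;> simp [h, ih]

theorem qOf_eq_foldC (acc : List (Int × (Int × Int))) (v : Int) :
    qOf acc v = foldC ((acc.filter (fun w => decide (w.1 < v))).map (·.2)) := by
  show acc.foldl (fun b w => if w.1 < v then comb b w.2 else b) (0,0) = _
  rw [show (fun (b : Int × Int) (w : Int × (Int × Int)) => if w.1 < v then comb b w.2 else b)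
      = (fun b w => if decide (w.1 < v) then comb b w.2 else b) by funext b w; simp]
  exact foldl_if_comb _ _ acc (0,0)

theorem goods_items {l : List Int} : ∀ p ∈ items l, 1 ≤ p.2.1 := by
  induction l using List.reverseRecOn with
  | nil => simp [items]
  | append_singleton t v ih =>
    intro p hp
    rw [items_snoc] at hp
    rcases List.mem_append.mp hp with h | h
    · exact ih p h
    · simp at h; subst h
      have hg : goodP (qOf (items t) v) := by
        rw [qOf_eq_foldC]
        refine foldC_good ?_
        intro x hx
        simp only [List.mem_map, List.mem_filter] at hx
        obtain ⟨w, ⟨hw, _⟩, hx⟩ := hx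
        exact Or.inr (hx ▸ ih w hw)
      rcases hg with hg | hg
      · simp [shiftP, hg]
      · simp [shiftP]; omega



def leavesT : SegTree → List (Int × Int)
  | .leaf v => [v]
  | .node _ l r => leavesT l ++ leavesT r

def wfT : Nat → SegTree → Prop
  | 0, t => ∃ v, t = .leaf v ∧ goodP v
  | h + 1, t => ∃ l r, t = .node (comb (stAgg l) (stAgg r)) l r ∧ wfT h l ∧ wfT h r

theorem length_leaves {h : Nat} {t : SegTree} (hw : wfT h t) : (leavesT t).length = 2 ^ h := by
  induction h generalizing t with
  | zero => obtain ⟨v, rfl, -⟩ := hw; simp [leavesT]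
  | succ h ih =>
    obtain ⟨l, r, rfl, hl, hr⟩ := hw
    simp [leavesT, ih hl, ih hr, Nat.pow_succ]; ring

theorem goods_leaves {h : Nat} {t : SegTree} (hw : wfT h t) : ∀ x ∈ leavesT t, goodP x := by
  induction h generalizing t with
  | zero => obtain ⟨v, rfl, hv⟩ := hw; simpa [leavesT] using hv
  | succ h ih =>
    obtain ⟨l, r, rfl, hl, hr⟩ := hw
    intro x hx
    rcases List.mem_append.mp (by simpa [leavesT] using hx) with h' | h'
    · exact ih hl x h'
    · exact ih hr x h'

theorem agg_eq {h : Nat} {t : SegTree} (hw : wfT h t) : stAgg t = foldC (leavesT t) := by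
  induction h generalizing t with
  | zero =>
    obtain ⟨v, rfl, hv⟩ := hw
    show v = comb (0,0) v
    rw [comb_comm]; exact (comb_zero_right hv).symm
  | succ h ih =>
    obtain ⟨l, r, rfl, hl, hr⟩ := hw
    show comb (stAgg l) (stAgg r) = foldC (leavesT l ++ leavesT r)
    rw [foldC_append (goods_leaves hl) (goods_leaves hr), ih hl, ih hr]

theorem wf_make (h : Nat) : wfT h (stMake h) ∧ leavesT (stMake h) = List.replicate (2 ^ h) (0, 0)
    ∧ stAgg (stMake h) = (0, 0) := by
  induction h with
  | zero => exact ⟨⟨(0,0), rfl, Or.inl rfl⟩, rfl, rfl⟩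
  | succ h ih =>
    obtain ⟨hw, hl, ha⟩ := ih
    refine ⟨⟨stMake h, stMake h, ?_, hw, hw⟩, ?_, ?_⟩
    · show SegTree.node (0,0) _ _ = _
      rw [ha]; rfl
    · show leavesT (stMake h) ++ leavesT (stMake h) = _
      rw [hl, Nat.pow_succ]
      rw [← List.replicate_add]
      congr 1; ring
    · rfl

theorem agg_update {h : Nat} {t : SegTree} (hw : wfT h t) (pos : Nat) (item : Int × Int) :
    stAgg (stUpdate t h pos item) = comb (stAgg t) item := by
  cases h with
  | zero => simp [stUpdate, stAgg]
  | succ h =>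
    obtain ⟨l, r, rfl, -, -⟩ := hw
    show stAgg (if pos < 2 ^ h then _ else _) = _
    split <;> rfl

theorem update_ok {h : Nat} {t : SegTree} (hw : wfT h t) {pos : Nat} (hp : pos < 2 ^ h)
    {item : Int × Int} (hi : goodP item) :
    wfT h (stUpdate t h pos item) ∧
    leavesT (stUpdate t h pos item)
      = (leavesT t).set pos (comb ((leavesT t).getD pos (0, 0)) item) := by
  induction h generalizing t pos with
  | zero =>
    obtain ⟨v, rfl, hv⟩ := hw
    interval_cases pos
    exact ⟨⟨comb v item, rfl, good_comb hv hi⟩, by simp [stUpdate, leavesT, stAgg]⟩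
  | succ h ih =>
    obtain ⟨l, r, rfl, hl, hr⟩ := hw
    have hll := length_leaves hl
    have hlr := length_leaves hr
    have hpow : (2:Nat) ^ (h+1) = 2 ^ h + 2 ^ h := by rw [Nat.pow_succ]; ring
    by_cases hc : pos < 2 ^ h
    · obtain ⟨hw', hlv⟩ := ih hl hc
      have hagg : stAgg (stUpdate l h pos item) = comb (stAgg l) item := agg_update hl pos item
      have hupd : stUpdate (SegTree.node (comb (stAgg l) (stAgg r)) l r) (h+1) pos item
          = SegTree.node (comb (comb (stAgg l) (stAgg r)) item) (stUpdate l h pos item) r := by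
        show (if pos < 2 ^ h then _ else _) = _
        simp [hc]
      constructor
      · rw [hupd]
        refine ⟨stUpdate l h pos item, r, ?_, hw', hr⟩
        rw [hagg, comb_assoc, comb_comm (stAgg r) item, ← comb_assoc]
      · rw [hupd]
        show leavesT (stUpdate l h pos item) ++ leavesT r
          = (leavesT l ++ leavesT r).set pos (comb ((leavesT l ++ leavesT r).getD pos (0,0)) item)
        rw [hlv, List.getD_append _ _ _ _ (by omega), List.set_append_left _ _ (by omega)]
    · have hc2 : pos - 2 ^ h < 2 ^ h := by omega
      obtain ⟨hw', hlv⟩ := ih hr hc2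
      have hagg : stAgg (stUpdate r h (pos - 2 ^ h) item) = comb (stAgg r) item :=
        agg_update hr _ item
      have hupd : stUpdate (SegTree.node (comb (stAgg l) (stAgg r)) l r) (h+1) pos item
          = SegTree.node (comb (comb (stAgg l) (stAgg r)) item) l
              (stUpdate r h (pos - 2 ^ h) item) := by
        show (if pos < 2 ^ h then _ else _) = _
        simp [hc]
      constructor
      · rw [hupd]
        refine ⟨l, stUpdate r h (pos - 2 ^ h) item, ?_, hl, hw'⟩
        rw [hagg, ← comb_assoc]
      · rw [hupd]
        show leavesT l ++ leavesT (stUpdate r h (pos - 2 ^ h) item)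
          = (leavesT l ++ leavesT r).set pos (comb ((leavesT l ++ leavesT r).getD pos (0,0)) item)
        rw [hlv, List.getD_append_right _ _ _ _ (by omega),
            List.set_append_right _ _ (by omega), hll]

theorem goods_take {l : List (Int × Int)} (hl : ∀ x ∈ l, goodP x) (k : Nat) :
    ∀ x ∈ l.take k, goodP x := fun x hx => hl x (List.mem_of_mem_take hx)

theorem query_eq {h : Nat} {t : SegTree} (hw : wfT h t) {k : Nat} (hk : k ≤ 2 ^ h) :
    stQuery t h k = foldC ((leavesT t).take k) := by
  induction h generalizing t k with
  | zero =>
    obtain ⟨v, rfl, hv⟩ := hw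
    interval_cases k
    · simp [stQuery, foldC]
    · show (if (1:Nat) = 0 then _ else if 2 ^ 0 ≤ 1 then stAgg _ else _) = _
      simpa [stQuery, leavesT] using agg_eq (h:=0) (t:=.leaf v) ⟨v, rfl, hv⟩
  | succ h ih =>
    obtain ⟨l, r, rfl, hl, hr⟩ := hw
    have hll := length_leaves hl
    have hlr := length_leaves hr
    have hpow : (2:Nat) ^ (h+1) = 2 ^ h + 2 ^ h := by rw [Nat.pow_succ]; ring
    by_cases h0 : k = 0
    · simp [stQuery, h0, foldC]
    by_cases hfull : 2 ^ (h+1) ≤ k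
    · have : k = 2 ^ (h+1) := le_antisymm hk hfull
      subst this
      have : stQuery (SegTree.node (comb (stAgg l) (stAgg r)) l r) (h+1) (2 ^ (h+1))
          = stAgg (SegTree.node (comb (stAgg l) (stAgg r)) l r) := by
        simp [stQuery]
      rw [this, List.take_of_length_le (by simp [leavesT]; omega)]
      exact agg_eq (h:=h+1) ⟨l, r, rfl, hl, hr⟩
    · have hq : stQuery (SegTree.node (comb (stAgg l) (stAgg r)) l r) (h+1) k
          = if k ≤ 2 ^ h then stQuery l h k
            else comb (stAgg l) (stQuery r h (k - 2 ^ h)) := by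
        show (if k = 0 then _ else if 2 ^ (h+1) ≤ k then _ else _) = _
        simp [h0, hfull]
      rw [hq]
      show _ = foldC ((leavesT l ++ leavesT r).take k)
      rw [List.take_append]
      by_cases hc : k ≤ 2 ^ h
      · have : k - (leavesT l).length = 0 := by omega
        rw [this]
        simp only [List.take_zero, List.append_nil, if_pos hc]
        exact ih hl hc
      · rw [if_neg hc, List.take_of_length_le (by omega), agg_eq hl,
            foldC_append (goods_leaves hl) (goods_take (goods_leaves hr) _), hll]
        congr 1
        exact ih hr (by omega)

theorem findH_ge (m h : Nat) : m ≤ 2 ^ (findH m h) := by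
  rw [findH]; split
  · exact findH_ge m (h + 1)
  · omega
termination_by m - 2 ^ h
decreasing_by
  have h2 : 2 ^ h < 2 ^ (h + 1) := Nat.pow_lt_pow_right (by norm_num) (Nat.lt_succ_self h)
  omega

theorem idxOf_lt_of_lt {l : List Int} (hp : l.Pairwise (· < ·)) {a b : Int}
    (ha : a ∈ l) (hb : b ∈ l) (hab : a < b) : l.idxOf a < l.idxOf b := by
  induction l with
  | nil => simp at ha
  | cons x t ih =>
    have hx := (List.pairwise_cons.mp hp).1
    have ht := (List.pairwise_cons.mp hp).2
    by_cases hax : a = x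
    · subst hax
      have hbx : b ≠ a := by omega
      have hbt : b ∈ t := by
        rcases List.mem_cons.mp hb with h | h
        · exact absurd h hbx
        · exact h
      rw [List.idxOf_cons_self, List.idxOf_cons_ne t (fun h => hbx h.symm)]
      omega
    · have hat : a ∈ t := by
        rcases List.mem_cons.mp ha with h | h
        · exact absurd h hax
        · exact h
      have hxa : x < a := hx a hat
      have hbx : b ≠ x := by omega
      have hbt : b ∈ t := by
        rcases List.mem_cons.mp hb with h | h
        · exact absurd h hbx
        · exact h
      rw [List.idxOf_cons_ne t (fun h => hax h.symm), List.idxOf_cons_ne t (fun h => hbx h.symm)]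
      have := ih ht hat hbt
      omega

theorem idxOf_lt_iff {l : List Int} (hp : l.Pairwise (· < ·)) {a b : Int}
    (ha : a ∈ l) (hb : b ∈ l) : l.idxOf a < l.idxOf b ↔ a < b := by
  constructor
  · intro h
    rcases lt_trichotomy a b with h' | h' | h'
    · exact h'
    · subst h'; omega
    · exact absurd (idxOf_lt_of_lt hp hb ha h') (by omega)
  · exact idxOf_lt_of_lt hp ha hb

theorem foldC_replicate (j : Nat) : foldC (List.replicate j ((0,0) : Int × Int)) = (0,0) := by
  induction j with
  | zero => rfl
  | succ j ih =>
    have : List.replicate (j+1) ((0,0) : Int × Int) = List.replicate j (0,0) ++ [(0,0)] := by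
      rw [← List.replicate_succ']
    rw [this]
    show (List.replicate j ((0,0):Int×Int) ++ [(0,0)]).foldl comb (0,0) = _
    rw [List.foldl_append]
    show comb (foldC (List.replicate j (0,0))) (0,0) = _
    rw [ih]; rfl

theorem foldC_snoc {l : List (Int × Int)} (hl : ∀ x ∈ l, goodP x) {p : Int × Int}
    (hp : goodP p) : foldC (l ++ [p]) = comb (foldC l) p := by
  rw [foldC_append hl (by simpa using hp)]
  congr 1
  show List.foldl comb (comb (0,0) p) [] = p
  show comb (0,0) p = p
  rw [comb_comm]; exact comb_zero_right hp

theorem foldC_set_comb {l : List (Int × Int)} (hl : ∀ x ∈ l, goodP x) {pos : Nat}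
    (hpos : pos < l.length) {item : Int × Int} (hi : goodP item) :
    foldC (l.set pos (comb (l.getD pos (0, 0)) item)) = comb (foldC l) item := by
  have hgd : l.getD pos (0,0) = l[pos] := List.getD_eq_getElem l _ hpos
  have hdecomp : l = l.take pos ++ l[pos] :: l.drop (pos + 1) := by
    conv_lhs => rw [← List.take_append_drop pos l]
    congr 1
    exact List.drop_eq_getElem_cons hpos
  have htk : (l.take pos).length = pos := by simp; omega
  have hset : l.set pos (comb (l.getD pos (0,0)) item)
      = l.take pos ++ comb l[pos] item :: l.drop (pos + 1) := by
    rw [List.set_eq_take_append_cons_drop, if_pos hpos, hgd]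
  have hg1 : ∀ x ∈ l.take pos, goodP x := goods_take hl pos
  have hg2 : ∀ x ∈ l.drop (pos+1), goodP x := fun x hx => hl x (List.mem_of_mem_drop hx)
  have hgp : goodP l[pos] := hl _ (l.getElem_mem hpos)
  have expand : ∀ y : Int × Int, goodP y →
      foldC (l.take pos ++ y :: l.drop (pos+1))
        = comb (comb (foldC (l.take pos)) y) (foldC (l.drop (pos+1))) := by
    intro y hy
    have heq : l.take pos ++ y :: l.drop (pos+1) = (l.take pos ++ [y]) ++ l.drop (pos+1) := by
      simp
    have hgy : ∀ x ∈ l.take pos ++ [y], goodP x := by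
      intro x hx
      rcases List.mem_append.mp hx with h | h
      · exact hg1 x h
      · simp at h; subst h; exact hy
    rw [heq, foldC_append hgy hg2, foldC_snoc hg1 hy]
  rw [hset, expand _ (good_comb hgp hi)]
  conv_rhs => rw [hdecomp]
  rw [expand _ hgp]
  rw [← comb_assoc, comb_left_comm]


def stepB (vals : List Int) (h : Nat) (st : SegTree × (Int × Int)) (v : Int) :
    SegTree × (Int × Int) :=
  let pos := vals.idxOf v
  let q := stQuery st.1 h pos
  let cand := (q.1 + 1, q.2 + v)
  (stUpdate st.1 h pos cand, comb st.2 cand)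

theorem goods_map_snd_items (l : List Int) : ∀ x ∈ (items l).map (·.2), goodP x := by
  intro x hx
  obtain ⟨p, hp, rfl⟩ := List.mem_map.mp hx
  exact Or.inr (goods_items p hp)

theorem loop_inv (vals : List Int) (hsort : vals.Pairwise (· < ·)) (h : Nat)
    (hlen : vals.length ≤ 2 ^ h) (l : List Int) (hmem : ∀ v ∈ l, v ∈ vals) :
    wfT h (l.foldl (stepB vals h) (stMake h, (0, 0))).1 ∧
    (l.foldl (stepB vals h) (stMake h, (0, 0))).2 = foldC ((items l).map (·.2)) ∧
    (∀ k, k ≤ 2 ^ h →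
      foldC ((leavesT (l.foldl (stepB vals h) (stMake h, (0, 0))).1).take k)
        = foldC (((items l).filter (fun w => decide (vals.idxOf w.1 < k))).map (·.2))) := by
  induction l using List.reverseRecOn with
  | nil =>
    obtain ⟨hw, hlv, -⟩ := wf_make h
    refine ⟨hw, rfl, ?_⟩
    intro k hk
    simp [items, hlv, List.take_replicate, foldC_replicate]
    rfl
  | append_singleton l v ih =>
    have hmem' : ∀ w ∈ l, w ∈ vals := fun w hw => hmem w (by simp [hw])
    have hv : v ∈ vals := hmem v (by simp)
    obtain ⟨hwf, hb, hq⟩ := ih hmem'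
    set st := l.foldl (stepB vals h) (stMake h, (0, 0)) with hst
    have hfold : (l ++ [v]).foldl (stepB vals h) (stMake h, (0, 0)) = stepB vals h st v := by
      rw [List.foldl_append]; rfl
    have hpos : vals.idxOf v < vals.length := List.idxOf_lt_length_of_mem hv
    have hpos2 : vals.idxOf v < 2 ^ h := by omega
    have hlenl := length_leaves hwf
    -- the query the step performs is exactly qOf (items l) v
    have hmemw : ∀ w ∈ items l, w.1 ∈ vals := by
      intro w hw
      apply hmem'
      have : w.1 ∈ (items l).map (·.1) := List.mem_map.mpr ⟨w, hw, rfl⟩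
      rwa [map_fst_items] at this
    have hfiltcong : (items l).filter (fun w => decide (vals.idxOf w.1 < vals.idxOf v))
        = (items l).filter (fun w => decide (w.1 < v)) := by
      apply List.filter_congr
      intro w hw
      simp only [decide_eq_decide]
      exact idxOf_lt_iff hsort (hmemw w hw) hv
    have hquery : stQuery st.1 h (vals.idxOf v) = qOf (items l) v := by
      rw [query_eq hwf (le_of_lt hpos2), hq _ (le_of_lt hpos2), hfiltcong, qOf_eq_foldC]
    have hcand : ((stQuery st.1 h (vals.idxOf v)).1 + 1, (stQuery st.1 h (vals.idxOf v)).2 + v)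
        = shiftP v (qOf (items l) v) := by rw [hquery]; rfl
    have hcgood : goodP (shiftP v (qOf (items l) v)) := by
      refine Or.inr (goods_items (l := l ++ [v]) (v, shiftP v (qOf (items l) v)) ?_)
      rw [items_snoc]
      exact List.mem_append.mpr (Or.inr (by simp))
    obtain ⟨hwf', hlv'⟩ := update_ok hwf hpos2 hcgood
    rw [hfold]
    simp only [stepB]
    rw [hcand]
    refine ⟨hwf', ?_, ?_⟩
    · rw [hb, items_snoc, List.map_append]
      exact (foldC_snoc (goods_map_snd_items l) hcgood).symm
    · intro k hk
      rw [hlv', List.take_set, items_snoc, List.filter_append, List.map_append]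
      by_cases hck : vals.idxOf v < k
      · have hkl : k ≤ (leavesT st.1).length := by omega
        have htklen : ((leavesT st.1).take k).length = k := by simp; omega
        have hgdeq : (leavesT st.1).getD (vals.idxOf v) (0,0)
            = ((leavesT st.1).take k).getD (vals.idxOf v) (0,0) := by
          rw [List.getD_eq_getElem _ _ (by omega), List.getD_eq_getElem _ _ (by omega)]
          exact (List.getElem_take).symm
        rw [hgdeq, foldC_set_comb (goods_take (goods_leaves hwf) k) (by omega) hcgood,
            hq k hk]
        have hone : (List.filter (fun w => decide (vals.idxOf w.1 < k))
              [(v, shiftP v (qOf (items l) v))])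
            = [(v, shiftP v (qOf (items l) v))] := by simp [hck]
        rw [hone]
        have hgf : ∀ x ∈ (List.filter (fun w => decide (vals.idxOf w.1 < k)) (items l)).map (·.2),
            goodP x := by
          intro x hx
          obtain ⟨p, hp, rfl⟩ := List.mem_map.mp hx
          exact Or.inr (goods_items p (List.mem_of_mem_filter hp))
        exact (foldC_snoc hgf hcgood).symm
      · have htklen : ((leavesT st.1).take k).length = k := by simp; omega
        rw [List.set_eq_of_length_le (by omega), hq k hk]
        have hnone : (List.filter (fun w => decide (vals.idxOf w.1 < k))
              [(v, shiftP v (qOf (items l) v))])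
            = [] := by simp [hck]
        rw [hnone]
        simp

theorem alt_eq_bestOf (arr : List Int) : nonLisMaxSum_alt arr = arr.sum - (bestOf arr).2 := by
  have hsort : (PySem.List.sorted (PySem.Set.ofList arr) (fun x => x) false).Pairwise (· < ·) :=
    PySem.List.sorted_ofList_pairwise_lt arr
  have hmem : ∀ v ∈ arr, v ∈ PySem.List.sorted (PySem.Set.ofList arr) (fun x => x) false := by
    intro v hv
    rw [PySem.List.mem_sorted]
    simpa [PySem.Set.mem_ofList] using hv
  obtain ⟨-, hb, -⟩ := loop_inv _ hsort _ (findH_ge _ 0) arr hmem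
  show arr.sum - (arr.foldl (stepB (PySem.List.sorted (PySem.Set.ofList arr) (fun x => x) false)
      (findH (PySem.List.sorted (PySem.Set.ofList arr) (fun x => x) false).length 0))
      (stMake (findH (PySem.List.sorted (PySem.Set.ofList arr) (fun x => x) false).length 0),
        (0, 0))).2.2 = _
  rw [hb]; rfl

-- ===== A side =====
def innerF (arr : List Int) (i : Int) (st : List Int × List Int) (j : Int) :
    List Int × List Int :=
  if PySem.List.pyGetD arr j 0 < PySem.List.pyGetD arr i 0 then
    if PySem.List.pyGetD st.1 j 0 + 1 > PySem.List.pyGetD st.1 i 0 then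
      (PySem.List.pySetD st.1 i (PySem.List.pyGetD st.1 j 0 + 1),
       PySem.List.pySetD st.2 i (PySem.List.pyGetD st.2 j 0 + PySem.List.pyGetD arr i 0))
    else if PySem.List.pyGetD st.1 j 0 + 1 = PySem.List.pyGetD st.1 i 0 then
      (st.1,
       PySem.List.pySetD st.2 i
         (min (PySem.List.pyGetD st.2 i 0)
              (PySem.List.pyGetD st.2 j 0 + PySem.List.pyGetD arr i 0)))
    else st
  else st

def stA (arr : List Int) (k : Nat) : List Int × List Int :=
  ((items (arr.take k)).map (·.2.1) ++ List.replicate (arr.length - k) 1,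
   (items (arr.take k)).map (·.2.2) ++ arr.drop k)

def stMid (arr : List Int) (k : Nat) (c : Int × Int) : List Int × List Int :=
  ((items (arr.take k)).map (·.2.1) ++ c.1 :: List.replicate (arr.length - k - 1) 1,
   (items (arr.take k)).map (·.2.2) ++ c.2 :: arr.drop (k + 1))

theorem length_items_take (arr : List Int) (k : Nat) (hk : k ≤ arr.length) :
    (items (arr.take k)).length = k := by
  rw [length_items, List.length_take]; omega

theorem stA_eq_stMid {arr : List Int} {k : Nat} (hk : k < arr.length) :
    stA arr k = stMid arr k (1, arr[k]) := by
  unfold stA stMid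
  have h1 : List.replicate (arr.length - k) (1:Int) = 1 :: List.replicate (arr.length - k - 1) 1 := by
    have h0 : arr.length - k = (arr.length - k - 1) + 1 := by omega
    rw [h0, List.replicate_succ]
    simp
  have h2 : arr.drop k = arr[k] :: arr.drop (k+1) := List.drop_eq_getElem_cons hk
  rw [h1, h2]

theorem inner_step {arr : List Int} {k : Nat} (hk : k < arr.length) {j : Nat} (hj : j < k)
    (c : Int × Int) :
    innerF arr (k : Int) (stMid arr k c) (j : Int)
      = stMid arr k
          (if ((items (arr.take k))[j]'(by rw [length_items_take arr k (by omega)]; omega)).1 < arr[k]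
           then comb c (shiftP arr[k] ((items (arr.take k))[j]'(by rw [length_items_take arr k (by omega)]; omega)).2)
           else c) := by
  have hlen : (items (arr.take k)).length = k := length_items_take arr k (by omega)
  have hjlt : j < (items (arr.take k)).length := by omega
  set itk := items (arr.take k) with hitk
  set w := itk[j]'hjlt with hw
  have hlen1 : (itk.map (·.2.1)).length = k := by simp [hlen]
  have hlen2 : (itk.map (·.2.2)).length = k := by simp [hlen]
  -- reads at j
  have hrA : PySem.List.pyGetD arr (j : Int) 0 = w.1 := by
    rw [PySem.List.pyGetD_natCast, List.getD_eq_getElem _ _ (by omega)]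
    have : arr[j]'(by omega) = (arr.take k)[j]'(by rw [List.length_take]; omega) := by
      rw [List.getElem_take]
    rw [this]
    have hmf := map_fst_items (arr.take k)
    calc (arr.take k)[j]'(by rw [List.length_take]; omega)
        = ((itk.map (·.1))[j]'(by rw [hmf, List.length_take]; omega)) := by
          congr 1; rw [hmf]
      _ = w.1 := by rw [List.getElem_map]
  have hrAk : PySem.List.pyGetD arr (k : Int) 0 = arr[k] := by
    rw [PySem.List.pyGetD_natCast, List.getD_eq_getElem _ _ (by omega)]
  have hr1 : PySem.List.pyGetD (stMid arr k c).1 (j : Int) 0 = w.2.1 := by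
    show PySem.List.pyGetD (itk.map (·.2.1) ++ _) (j : Int) 0 = _
    rw [PySem.List.pyGetD_natCast, List.getD_append _ _ _ _ (by omega),
        List.getD_eq_getElem _ _ (by omega), List.getElem_map]
  have hr2 : PySem.List.pyGetD (stMid arr k c).2 (j : Int) 0 = w.2.2 := by
    show PySem.List.pyGetD (itk.map (·.2.2) ++ _) (j : Int) 0 = _
    rw [PySem.List.pyGetD_natCast, List.getD_append _ _ _ _ (by omega),
        List.getD_eq_getElem _ _ (by omega), List.getElem_map]
  have hr1k : PySem.List.pyGetD (stMid arr k c).1 (k : Int) 0 = c.1 := by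
    show PySem.List.pyGetD (itk.map (·.2.1) ++ c.1 :: _) (k : Int) 0 = _
    rw [PySem.List.pyGetD_natCast, List.getD_append_right _ _ _ _ (by omega)]
    simp [hlen1]
  have hr2k : PySem.List.pyGetD (stMid arr k c).2 (k : Int) 0 = c.2 := by
    show PySem.List.pyGetD (itk.map (·.2.2) ++ c.2 :: _) (k : Int) 0 = _
    rw [PySem.List.pyGetD_natCast, List.getD_append_right _ _ _ _ (by omega)]
    simp [hlen2]
  have hs1 : ∀ x : Int, PySem.List.pySetD (stMid arr k c).1 (k : Int) x
      = (stMid arr k (x, c.2)).1 := by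
    intro x
    show PySem.List.pySetD (itk.map (·.2.1) ++ c.1 :: _) (k : Int) x = _
    rw [PySem.List.pySetD_natCast, List.set_append_right _ _ (by omega)]
    simp [hlen1]
    rfl
  have hs2 : ∀ x : Int, PySem.List.pySetD (stMid arr k c).2 (k : Int) x
      = (stMid arr k (c.1, x)).2 := by
    intro x
    show PySem.List.pySetD (itk.map (·.2.2) ++ c.2 :: _) (k : Int) x = _
    rw [PySem.List.pySetD_natCast, List.set_append_right _ _ (by omega)]
    simp [hlen2]
    rfl
  unfold innerF
  rw [hrA, hrAk, hr1, hr1k, hr2, hr2k]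
  by_cases hvw : w.1 < arr[k]
  · rw [if_pos hvw]
    by_cases h1 : w.2.1 + 1 > c.1
    · rw [if_pos h1, hs1, hs2]
      have : comb c (shiftP arr[k] w.2) = (w.2.1 + 1, w.2.2 + arr[k]) := by
        simp only [comb, shiftP]
        rw [if_neg (by simp; omega), if_pos (by simp; omega)]
      rw [if_pos hvw, this]
      unfold stMid
      rfl
    · rw [if_neg h1]
      by_cases h2 : w.2.1 + 1 = c.1
      · rw [if_pos h2, hs2]
        have : comb c (shiftP arr[k] w.2) = (c.1, min c.2 (w.2.2 + arr[k])) := by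
          simp only [comb, shiftP]
          rw [if_neg (by simp; omega), if_neg (by simp; omega)]
        rw [if_pos hvw, this]
        unfold stMid
        rfl
      · rw [if_neg h2, if_pos hvw]
        have : comb c (shiftP arr[k] w.2) = c := by
          simp only [comb, shiftP]
          rw [if_pos (by simp; omega)]
        rw [this]
  · rw [if_neg hvw, if_neg hvw]

theorem fold_shift (v : Int) (l : List (Int × (Int × Int))) (b : Int × Int) :
    l.foldl (fun c w => if w.1 < v then comb c (shiftP v w.2) else c) (shiftP v b)
      = shiftP v (l.foldl (fun c w => if w.1 < v then comb c w.2 else c) b) := by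
  induction l generalizing b with
  | nil => rfl
  | cons w t ih =>
    simp only [List.foldl_cons]
    by_cases hw : w.1 < v
    · rw [if_pos hw, if_pos hw, ← shift_comb, ih]
    · rw [if_neg hw, if_neg hw, ih]

theorem inner_fold {arr : List Int} {k : Nat} (hk : k < arr.length) {j : Nat} (hj : j ≤ k) :
    (PySem.List.pyRange 0 (j : Int) 1).foldl (innerF arr (k : Int)) (stA arr k)
      = stMid arr k (((items (arr.take k)).take j).foldl
          (fun c w => if w.1 < arr[k] then comb c (shiftP arr[k] w.2) else c) (1, arr[k])) := by
  induction j with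
  | zero =>
    rw [show ((0:Nat) : Int) = 0 by rfl, PySem.List.pyRange_one_eq_nil (by omega)]
    simp only [List.foldl_nil, List.take_zero]
    exact stA_eq_stMid hk
  | succ j ih =>
    have hj' : j ≤ k := by omega
    have hcast : ((j+1 : Nat) : Int) = (j : Int) + 1 := by push_cast; ring
    rw [hcast, PySem.List.pyRange_one_succ_right (by positivity), List.foldl_append]
    rw [ih hj']
    simp only [List.foldl_cons, List.foldl_nil]
    have hlen : (items (arr.take k)).length = k := length_items_take arr k (by omega)
    have hjl : j < (items (arr.take k)).length := by omega
    rw [inner_step hk (by omega)]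
    have htk : (items (arr.take k)).take (j+1)
        = (items (arr.take k)).take j ++ [(items (arr.take k))[j]'hjl] := by
      rw [List.take_succ, List.getElem?_eq_getElem hjl]
      rfl
    rw [htk, List.foldl_append]
    rfl

theorem outer_fold (arr : List Int) {k : Nat} (hk : k ≤ arr.length) :
    (PySem.List.pyRange 0 (k : Int) 1).foldl
      (fun st i => (PySem.List.pyRange 0 i 1).foldl (innerF arr i) st) (stA arr 0)
      = stA arr k := by
  induction k with
  | zero => rw [show ((0:Nat) : Int) = 0 by rfl, PySem.List.pyRange_one_eq_nil (by omega)]; rfl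
  | succ k ih =>
    have hk' : k ≤ arr.length := by omega
    have hkl : k < arr.length := by omega
    have hcast : ((k+1 : Nat) : Int) = (k : Int) + 1 := by push_cast; ring
    rw [hcast, PySem.List.pyRange_one_succ_right (by positivity), List.foldl_append, ih hk']
    simp only [List.foldl_cons, List.foldl_nil]
    rw [inner_fold hkl (le_refl k)]
    have hlen : (items (arr.take k)).length = k := length_items_take arr k hk'
    rw [List.take_of_length_le (by omega)]
    have hshift : ((1 : Int), arr[k]) = shiftP arr[k] (0, 0) := by simp [shiftP]
    rw [hshift, fold_shift]
    have hq : (items (arr.take k)).foldl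
        (fun c w => if w.1 < arr[k] then comb c w.2 else c) (0, 0)
        = qOf (items (arr.take k)) arr[k] := rfl
    rw [hq]
    have htk : arr.take (k+1) = arr.take k ++ [arr[k]] := by
      rw [List.take_succ, List.getElem?_eq_getElem hkl]
      rfl
    unfold stMid stA
    rw [htk, items_snoc]
    simp only [List.map_append, List.map_cons, List.map_nil]
    have hsub : arr.length - (k + 1) = arr.length - k - 1 := by omega
    rw [hsub, List.append_assoc, List.append_assoc]
    rfl

theorem max_part {ps : List (Int × Int)} (h0 : ps ≠ []) (hg : ∀ p ∈ ps, 1 ≤ p.1) :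
    (PySem.List.max? (ps.map (·.1)) (fun x => x)).getD 0 = (foldC ps).1 := by
  obtain ⟨p, t, rfl⟩ := List.exists_cons_of_ne_nil h0
  rw [List.map_cons, PySem.List.max?_id_cons, Option.getD_some]
  show _ = ((p :: t).foldl comb (0,0)).1
  rw [foldl_comb_fst]
  simp only [List.foldl_cons]
  rw [List.foldl_map]
  congr 1
  have := hg p (by simp)
  omega

theorem foldl_range_pairs {β : Type} (ps : List (Int × Int)) (g : β → Int → Int → β) (a : β) :
    (PySem.List.pyRange 0 ((ps.length : Nat) : Int) 1).foldl
      (fun acc i => g acc (PySem.List.pyGetD (ps.map (·.1)) i 0)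
        (PySem.List.pyGetD (ps.map (·.2)) i 0)) a
      = ps.foldl (fun acc p => g acc p.1 p.2) a := by
  induction ps using List.reverseRecOn generalizing a with
  | nil => rfl
  | append_singleton l p ih =>
    have hcast : (((l ++ [p]).length : Nat) : Int) = ((l.length : Nat) : Int) + 1 := by
      simp
    rw [hcast, PySem.List.pyRange_one_succ_right (by positivity), List.foldl_append,
        List.foldl_append]
    have hcong : (PySem.List.pyRange 0 ((l.length : Nat) : Int) 1).foldl
        (fun acc i => g acc (PySem.List.pyGetD ((l ++ [p]).map (·.1)) i 0)
          (PySem.List.pyGetD ((l ++ [p]).map (·.2)) i 0)) a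
        = (PySem.List.pyRange 0 ((l.length : Nat) : Int) 1).foldl
        (fun acc i => g acc (PySem.List.pyGetD (l.map (·.1)) i 0)
          (PySem.List.pyGetD (l.map (·.2)) i 0)) a := by
      apply PySem.List.foldl_congr_mem
      intro acc i hi
      have hi' := (PySem.List.mem_pyRange_one).mp hi
      have h0 : 0 ≤ i := hi'.1
      have h1 : i < (l.length : Int) := hi'.2
      rw [PySem.List.pyGetD_of_nonneg _ _ h0, PySem.List.pyGetD_of_nonneg _ _ h0,
          PySem.List.pyGetD_of_nonneg _ _ h0, PySem.List.pyGetD_of_nonneg _ _ h0]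
      rw [List.map_append, List.map_append, List.getD_append _ _ _ _ (by simp; omega),
          List.getD_append _ _ _ _ (by simp; omega)]
    rw [hcong, ih]
    simp only [List.foldl_cons, List.foldl_nil]
    congr 1
    · rw [PySem.List.pyGetD_of_nonneg _ _ (by positivity), List.map_append,
          List.getD_append_right _ _ _ _ (by simp), Int.toNat_natCast]
      simp
    · rw [PySem.List.pyGetD_of_nonneg _ _ (by positivity), List.map_append,
          List.getD_append_right _ _ _ _ (by simp), Int.toNat_natCast]
      simp

def sStep (L : Int) (acc : Option Int) (p : Int × Int) : Option Int :=
  if p.1 = L then some (match acc with | none => p.2 | some m => min m p.2) else acc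

theorem scan_const {L : Int} {ps : List (Int × Int)} (h : ∀ p ∈ ps, p.1 ≠ L)
    (a : Option Int) : ps.foldl (sStep L) a = a := by
  induction ps generalizing a with
  | nil => rfl
  | cons p t ih =>
    simp only [List.foldl_cons]
    rw [show sStep L a p = a by simp [sStep, h p (by simp)], ih (fun q hq => h q (by simp [hq]))]

theorem scan_spec {ps : List (Int × Int)} (h0 : ps ≠ []) (hg : ∀ p ∈ ps, 1 ≤ p.1) :
    ps.foldl (sStep (foldC ps).1) none = some (foldC ps).2 := by
  induction ps using List.reverseRecOn with
  | nil => simp at h0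
  | append_singleton l p ih =>
    have hp : 1 ≤ p.1 := hg p (by simp)
    have hgl : ∀ q ∈ l, 1 ≤ q.1 := fun q hq => hg q (by simp [hq])
    have hgoodl : ∀ q ∈ l, goodP q := fun q hq => Or.inr (hgl q hq)
    have hB' : foldC (l ++ [p]) = comb (foldC l) p := foldC_snoc hgoodl (Or.inr hp)
    rcases eq_or_ne l [] with rfl | hl
    · have : foldC ([] ++ [p]) = p := by
        show List.foldl comb (comb (0,0) p) [] = p
        show comb (0,0) p = p
        rw [comb_comm]; exact comb_zero_right (Or.inr hp)
      rw [this]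
      show sStep p.1 none p = some p.2
      simp [sStep]
    · have hB := ih hl hgl
      set B := foldC l with hBdef
      rw [hB', List.foldl_append]
      rcases lt_trichotomy p.1 B.1 with hc | hc | hc
      · have hcomb : comb B p = B := by simp only [comb]; rw [if_pos hc]
        rw [hcomb]
        simp only [List.foldl_cons, List.foldl_nil]
        rw [hB, show sStep B.1 (some B.2) p = some B.2 by simp [sStep]; omega]
      · have hcomb : comb B p = (B.1, min B.2 p.2) := by
          simp only [comb]; rw [if_neg (by omega), if_neg (by omega)]
        rw [hcomb]
        simp only [List.foldl_cons, List.foldl_nil]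
        have : (B.1, min B.2 p.2).1 = B.1 := rfl
        rw [this, hB]
        simp [sStep, hc]
      · have hcomb : comb B p = p := by
          simp only [comb]; rw [if_neg (by omega), if_pos hc]
        rw [hcomb]
        simp only [List.foldl_cons, List.foldl_nil]
        rw [scan_const (fun q hq => by
          have hle : q.1 ≤ B.1 := by rw [hBdef]; exact le_foldC_fst hq
          omega) none]
        simp [sStep]


theorem a_eq (arr : List Int) (hne : arr ≠ []) :
    nonLisMaxSum arr = arr.sum - (bestOf arr).2 := by
  have hA : nonLisMaxSum arr = (fun (dpsd : List Int × List Int) =>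
      arr.sum - (Option.getD ((PySem.List.pyRange 0 (arr.length : Int) 1).foldl (fun acc i =>
        if PySem.List.pyGetD dpsd.1 i 0 = (PySem.List.max? dpsd.1 (fun x => x)).getD 0 then
          some (match acc with
                | none => PySem.List.pyGetD dpsd.2 i 0
                | some m => min m (PySem.List.pyGetD dpsd.2 i 0))
        else acc) none) 0))
      ((PySem.List.pyRange 0 (arr.length : Int) 1).foldl
        (fun st i => (PySem.List.pyRange 0 i 1).foldl (innerF arr i) st)
        (List.replicate arr.length 1,
         (PySem.List.pyRange 0 (arr.length : Int) 1).map (fun i => PySem.List.pyGetD arr i 0))) := rfl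
  rw [hA]
  have hsd0 : (PySem.List.pyRange 0 (arr.length : Int) 1).map (fun i => PySem.List.pyGetD arr i 0)
      = arr := PySem.List.map_pyGetD_pyRange_zero' arr 0
  rw [hsd0]
  have h0 : (List.replicate arr.length (1:Int), arr) = stA arr 0 := by
    unfold stA
    simp [items]
  rw [h0, outer_fold arr (le_refl arr.length)]
  have hfin : stA arr arr.length
      = (((items arr).map (·.2)).map (·.1), ((items arr).map (·.2)).map (·.2)) := by
    unfold stA
    simp [List.take_length, List.map_map, Function.comp]
  rw [hfin]
  set ps := (items arr).map (·.2) with hps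
  have hlenps : ps.length = arr.length := by rw [hps, List.length_map, length_items]
  have hps0 : ps ≠ [] := by
    intro hcon
    apply hne
    rw [hcon] at hlenps
    exact List.eq_nil_of_length_eq_zero (by simpa using hlenps.symm)
  have hg : ∀ p ∈ ps, 1 ≤ p.1 := by
    intro p hp
    obtain ⟨q, hq, rfl⟩ := List.mem_map.mp hp
    exact goods_items q hq
  simp only []
  rw [max_part hps0 hg]
  have hrange : ((arr.length : Nat) : Int) = ((ps.length : Nat) : Int) := by rw [hlenps]
  rw [hrange]
  show arr.sum - (((PySem.List.pyRange 0 ((ps.length : Nat) : Int) 1).foldl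
      (fun acc i => sStep ((foldC ps).1) acc
        (PySem.List.pyGetD (ps.map (·.1)) i 0, PySem.List.pyGetD (ps.map (·.2)) i 0))
      none).getD 0) = arr.sum - (bestOf arr).2
  rw [foldl_range_pairs ps (fun acc x y => sStep ((foldC ps).1) acc (x, y)) none]
  have hfold : ps.foldl (fun acc p => sStep ((foldC ps).1) acc (p.1, p.2)) none
      = ps.foldl (sStep ((foldC ps).1)) none := by
    apply PySem.List.foldl_congr_mem
    intro acc p _
    rfl
  rw [hfold, scan_spec hps0 hg]
  rfl

-- ===== VERDICT (by name: the statement is the Claim_ definition above) =====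
theorem nonLisMaxSum_spec : Claim_equal_nonLisMaxSum := by
  intro arr _ hpre
  unfold Spec_nonLisMaxSum
  rw [a_eq arr hpre, alt_eq_bestOf arr]
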